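-- pv_equiv track=rewrite | github.com/EleckTroniiKz/ai-group-assignment | Wahlaufgabe 2/art_show_rob.py | create_q_table_and_state_table
-- ===== SOURCE A (Python) =====
-- def create_q_table_and_state_table(reward_matrix):
--     dict = {}
--
--     for i, inner_list in enumerate(reward_matrix):
--         dict[i] = {}
--         for j, value in enumerate(inner_list):
--             if value != -1:
--                 dict[i][j] =  value
--     q_table = {}
--     state_table = {}
--
--     for i in dict.keys():
--         q_table[i] = {}
--         state_table[i] = {}
--         for j in dict[i].keys():
--             if i == 12:
--                 possible_keys = dict[i].keys()
--                 if 7 in possible_keys: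
--                     q_table[i]["R"] = dict[i][7]
--                     state_table[i]["R"] = 7
--                 continue
--             elif i == 20:
--                 possible_keys = dict[i].keys()
--                 if 11 in possible_keys:
--                     q_table[i]["L"] = dict[i][11]
--                     state_table[i]["L"] = 11
--                 continue
--             elif i == 7:
--                 possible_keys = dict[i].keys()
--                 if 12 in possible_keys:
--                     q_table[i]["L"] = dict[i][12]
--                     state_table[i]["L"] = 12
--                 if 13 in possible_keys:
--                     q_table[i]["R"] = dict[i][13]
--                     state_table[i]["R"] = 13
--                 if 0 in possible_keys:
--                     q_table[i]["U"] = dict[i][0]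
--                     state_table[i]["U"] = 0
--                 if 24 in possible_keys:
--                     q_table[i]["D"] = dict[i][24]
--                     state_table[i]["D"] = 24
--                 continue
--             elif i == 11:
--                 possible_keys = dict[i].keys()
--                 if 20 in possible_keys:
--                     q_table[i]["R"] = dict[i][20]
--                     state_table[i]["R"] = 20
--                 if 19 in possible_keys:
--                     q_table[i]["L"] = dict[i][19]
--                     state_table[i]["L"] = 19
--                 if 6 in possible_keys:
--                     q_table[i]["U"] = dict[i][6]
--                     state_table[i]["U"] = 6
--                 if 30 in possible_keys:
--                     q_table[i]["D"] = dict[i][30]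
--                     state_table[i]["D"] = 30
--                 continue
--             if j-1 == i:
--                 q_table[i]["R"] = dict[i][j]
--                 state_table[i]["R"] = j
--             elif j+1 == i:
--                 q_table[i]["L"] = dict[i][j]
--                 state_table[i]["L"] = j
--             elif j+1 < i:
--                 q_table[i]["U"] = dict[i][j]
--                 state_table[i]["U"] = j
--             elif j-1 > i:
--                 q_table[i]["D"] = dict[i][j]
--                 state_table[i]["D"] = j
--
--     return q_table, state_table
-- ===== SOURCE B (Python) =====
-- _SPECIAL = {12: (("R", 7),), 20: (("L", 11),),
--             7: (("L", 12), ("R", 13), ("U", 0), ("D", 24)),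
--             11: (("R", 20), ("L", 19), ("U", 6), ("D", 30))}
--
--
-- def _last_valid(row, lo, hi):
--     """Largest j in [lo, hi) with row[j] != -1, or None."""
--     for j in reversed(range(lo, hi)):
--         if row[j] != -1:
--             return j
--     return None
--
--
-- def _targets(i, row):
--     """Ordered (label, column) moves of state i, computed directly."""
--     n = len(row)
--     if i in _SPECIAL:
--         return [(lab, t) for lab, t in _SPECIAL[i] if 0 <= t < n and row[t] != -1]
--     out = []
--     u = _last_valid(row, 0, min(n, i - 1))
--     if u is not None:
--         out.append(("U", u))
--     if 0 <= i - 1 < n and row[i - 1] != -1: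
--         out.append(("L", i - 1))
--     if 0 <= i + 1 < n and row[i + 1] != -1:
--         out.append(("R", i + 1))
--     d = _last_valid(row, max(0, i + 2), n)
--     if d is not None:
--         out.append(("D", d))
--     return out
--
--
-- def create_q_table_and_state_table(reward_matrix):
--     q_table, state_table = {}, {}
--     for i, row in enumerate(reward_matrix):
--         targets = _targets(i, row)
--         state_table[i] = {lab: j for lab, j in targets}
--         q_table[i] = {lab: row[j] for lab, j in targets}
--     return q_table, state_table
-- ===== Notes on version B (the rewrite author's own statement) =====
-- stated objective: alternative
-- what changed: Instead of A's two staged dict-building passes that classify every valid cell of a row through a branch chain with overwrites (and re-run the special-row block once per valid cell), B computes each row's ordered move list directly in closed form: U and D are found by one backward scan for the last valid column below i-1 (resp. above i+1), L and R are single validity checks at i-1/i+1, and special rows are a filter of a constant target table; both tables are then built from that list in one loop.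
import Mathlib
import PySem

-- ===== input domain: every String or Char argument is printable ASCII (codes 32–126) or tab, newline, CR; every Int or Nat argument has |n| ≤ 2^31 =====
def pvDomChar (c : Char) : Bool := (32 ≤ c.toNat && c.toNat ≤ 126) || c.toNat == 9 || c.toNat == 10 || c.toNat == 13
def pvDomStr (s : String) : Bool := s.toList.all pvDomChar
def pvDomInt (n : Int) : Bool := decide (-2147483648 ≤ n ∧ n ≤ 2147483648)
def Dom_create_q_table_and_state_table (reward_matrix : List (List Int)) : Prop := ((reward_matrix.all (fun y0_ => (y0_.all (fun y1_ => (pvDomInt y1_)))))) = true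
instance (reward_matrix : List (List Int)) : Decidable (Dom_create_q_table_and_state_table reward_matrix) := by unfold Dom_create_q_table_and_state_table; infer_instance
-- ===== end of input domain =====

-- B replaces A's cell-by-cell classification (intermediate dict of valid cells, then a
-- re-executed branch chain per valid cell with dict overwrites) by a closed-form per-row
-- move list: one backward scan each for the U/D column, single validity checks for L/R,
-- and a filtered constant table for the special rows; same values, alternative algorithm.

-- ===== PORT A =====
-- helper: the pair of statements  q_table[i][lab] = qv; state_table[i][lab] = sv
def pvSetQS (q s : PySem.Dict Int (PySem.Dict String Int)) (i : Int) (lab : String) (qv sv : Int) :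
    PySem.Dict Int (PySem.Dict String Int) × PySem.Dict Int (PySem.Dict String Int) :=
  (q.insert i ((q.getD i PySem.Dict.empty).insert lab qv),
   s.insert i ((s.getD i PySem.Dict.empty).insert lab sv))

-- the body of A's second loop over j (di = dict[i]); dict[i][k] reads are guarded, getD is exact
def pvRowStep (di : PySem.Dict Int Int) (i : Int)
    (qs : PySem.Dict Int (PySem.Dict String Int) × PySem.Dict Int (PySem.Dict String Int)) (j : Int) :
    PySem.Dict Int (PySem.Dict String Int) × PySem.Dict Int (PySem.Dict String Int) :=
  let q := qs.1
  let s := qs.2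
  if i = 12 then
    if di.contains 7 then pvSetQS q s i "R" (di.getD 7 0) 7 else (q, s)
  else if i = 20 then
    if di.contains 11 then pvSetQS q s i "L" (di.getD 11 0) 11 else (q, s)
  else if i = 7 then
    let qs := if di.contains 12 then pvSetQS q s i "L" (di.getD 12 0) 12 else (q, s)
    let qs := if di.contains 13 then pvSetQS qs.1 qs.2 i "R" (di.getD 13 0) 13 else qs
    let qs := if di.contains 0 then pvSetQS qs.1 qs.2 i "U" (di.getD 0 0) 0 else qs
    if di.contains 24 then pvSetQS qs.1 qs.2 i "D" (di.getD 24 0) 24 else qs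
  else if i = 11 then
    let qs := if di.contains 20 then pvSetQS q s i "R" (di.getD 20 0) 20 else (q, s)
    let qs := if di.contains 19 then pvSetQS qs.1 qs.2 i "L" (di.getD 19 0) 19 else qs
    let qs := if di.contains 6 then pvSetQS qs.1 qs.2 i "U" (di.getD 6 0) 6 else qs
    if di.contains 30 then pvSetQS qs.1 qs.2 i "D" (di.getD 30 0) 30 else qs
  else if j - 1 = i then pvSetQS q s i "R" (di.getD j 0) j
  else if j + 1 = i then pvSetQS q s i "L" (di.getD j 0) j
  else if j + 1 < i then pvSetQS q s i "U" (di.getD j 0) j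
  else if j - 1 > i then pvSetQS q s i "D" (di.getD j 0) j
  else (q, s)

def create_q_table_and_state_table (reward_matrix : List (List Int)) :
    (List (Int × List (String × Int))) × (List (Int × List (String × Int))) :=
  let dict : PySem.Dict Int (PySem.Dict Int Int) :=
    (PySem.List.enumerate reward_matrix).foldl
      (fun d p =>
        let d := d.insert p.1 PySem.Dict.empty
        (PySem.List.enumerate p.2).foldl
          (fun d q => if q.2 ≠ -1 then d.insert p.1 ((d.getD p.1 PySem.Dict.empty).insert q.1 q.2) else d)
          d)
      PySem.Dict.empty
  let qs :=
    dict.keys.foldl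
      (fun qs i =>
        let q := qs.1.insert i PySem.Dict.empty
        let s := qs.2.insert i PySem.Dict.empty
        (dict.getD i PySem.Dict.empty).keys.foldl (pvRowStep (dict.getD i PySem.Dict.empty) i) (q, s))
      (PySem.Dict.empty, PySem.Dict.empty)
  (qs.1.items.map (fun p => (p.1, p.2.items)), qs.2.items.map (fun p => (p.1, p.2.items)))

-- ===== PORT B =====
-- the constant _SPECIAL table
def pvSpecialTb : PySem.Dict Int (List (String × Int)) :=
  PySem.Dict.ofList
    [(12, [("R", 7)]), (20, [("L", 11)]),
     (7, [("L", 12), ("R", 13), ("U", 0), ("D", 24)]),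
     (11, [("R", 20), ("L", 19), ("U", 6), ("D", 30)])]

-- _last_valid: first j of reversed(range(lo, hi)) with row[j] != -1; j is in range, pyGetD exact
def pvLastValid (row : List Int) (lo hi : Int) : Option Int :=
  ((PySem.List.pyRange lo hi 1).reverse).find? (fun j => decide (PySem.List.pyGetD row j 0 ≠ -1))

-- _targets; row[t] reads are guarded by 0 <= t < n, pyGetD exact
def pvTargets (i : Int) (row : List Int) : List (String × Int) :=
  let n : Int := row.length
  if pvSpecialTb.contains i then
    (pvSpecialTb.getD i []).filter
      (fun p => decide (0 ≤ p.2 ∧ p.2 < n ∧ PySem.List.pyGetD row p.2 0 ≠ -1))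
  else
    (match pvLastValid row 0 (min n (i - 1)) with
      | some u => [("U", u)] | none => []) ++
    (if 0 ≤ i - 1 ∧ i - 1 < n ∧ PySem.List.pyGetD row (i - 1) 0 ≠ -1 then [("L", i - 1)] else []) ++
    (if 0 ≤ i + 1 ∧ i + 1 < n ∧ PySem.List.pyGetD row (i + 1) 0 ≠ -1 then [("R", i + 1)] else []) ++
    (match pvLastValid row (max 0 (i + 2)) n with
      | some d => [("D", d)] | none => [])

def create_q_table_and_state_table_alt (reward_matrix : List (List Int)) :
    (List (Int × List (String × Int))) × (List (Int × List (String × Int))) :=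
  let qs :=
    (PySem.List.enumerate reward_matrix).foldl
      (fun qs p =>
        let ts := pvTargets p.1 p.2
        (qs.1.insert p.1 (PySem.Dict.ofList (ts.map (fun r => (r.1, PySem.List.pyGetD p.2 r.2 0)))),
         qs.2.insert p.1 (PySem.Dict.ofList ts)))
      ((PySem.Dict.empty : PySem.Dict Int (PySem.Dict String Int)), (PySem.Dict.empty : PySem.Dict Int (PySem.Dict String Int)))
  (qs.1.items.map (fun p => (p.1, p.2.items)), qs.2.items.map (fun p => (p.1, p.2.items)))

-- ===== PRECONDITION & SPEC =====
def Spec_create_q_table_and_state_table (reward_matrix : List (List Int)) (out : (List (Int × List (String × Int))) × (List (Int × List (String × Int)))) : Prop := out = create_q_table_and_state_table_alt reward_matrix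
instance (reward_matrix : List (List Int)) (out : (List (Int × List (String × Int))) × (List (Int × List (String × Int)))) : Decidable (Spec_create_q_table_and_state_table reward_matrix out) := by unfold Spec_create_q_table_and_state_table; infer_instance

-- ===== CLAIM (what is proved, stated in full; the proofs are below) =====
def Claim_equal_create_q_table_and_state_table : Prop := ∀ (reward_matrix : List (List Int)), Dom_create_q_table_and_state_table reward_matrix → Spec_create_q_table_and_state_table reward_matrix (create_q_table_and_state_table reward_matrix)

-- ===== LEMMAS AND PROOFS =====

-- generic: overwriting a present key with its present value is a no-op
theorem pv_insert_eq_self {κ ν : Type} [BEq κ] [LawfulBEq κ] (d : PySem.Dict κ ν) (k : κ) (v : ν)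
    (h : d.get? k = some v) (hn : d.keys.Nodup) : d.insert k v = d := by
  apply PySem.Dict.ext
  have hc : d.contains k = true := by
    rw [PySem.Dict.contains_eq_isSome_get?, h]; rfl
  rw [PySem.Dict.items_insert_of_contains _ _ hc]
  have : ∀ p ∈ d.items, (if p.1 == k then (k, v) else p) = p := by
    intro p hp
    by_cases hpk : p.1 = k
    · have hg : d.get? p.1 = some p.2 := PySem.Dict.get?_of_mem_items _ hp hn
      rw [hpk] at hg
      rw [h] at hg
      have hv : v = p.2 := Option.some_inj.mp hg
      subst hv
      rw [← hpk]
      simp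
    · simp [hpk]
  rw [List.map_congr_left this]
  exact List.map_id' _

-- ---- A's first loop ----
-- the per-row inner dict  {j : value for j, value in enumerate(row) if value != -1}
def pvInnerD (row : List Int) : PySem.Dict Int Int :=
  (PySem.List.enumerate row).foldl
    (fun d q => if q.2 ≠ -1 then d.insert q.1 q.2 else d) PySem.Dict.empty

theorem pv_inner_loop (i : Int) (l : List (Int × Int)) (d : PySem.Dict Int (PySem.Dict Int Int))
    (di : PySem.Dict Int Int) (h : d.get? i = some di) (hn : d.keys.Nodup) :
    l.foldl (fun d q => if q.2 ≠ -1 then d.insert i ((d.getD i PySem.Dict.empty).insert q.1 q.2) else d) d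
      = d.insert i (l.foldl (fun dd q => if q.2 ≠ -1 then dd.insert q.1 q.2 else dd) di) := by
  induction l generalizing d di with
  | nil => simpa using (pv_insert_eq_self d i di h hn).symm
  | cons q l ih =>
    simp only [List.foldl_cons]
    by_cases hq : q.2 ≠ -1
    · simp only [if_pos hq]
      rw [PySem.Dict.getD_of_get?_eq_some _ _ h]
      rw [ih _ _ (PySem.Dict.get?_insert_self _ _ _) (PySem.Dict.nodup_keys_insert _ _ _ hn),
        PySem.Dict.insert_insert_self]
    · simp only [if_neg hq]
      exact ih _ _ h hn

theorem pv_dict_items (rm : List (List Int)) :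
    ((PySem.List.enumerate rm).foldl
      (fun d p =>
        let d := d.insert p.1 PySem.Dict.empty
        (PySem.List.enumerate p.2).foldl
          (fun d q => if q.2 ≠ -1 then d.insert p.1 ((d.getD p.1 PySem.Dict.empty).insert q.1 q.2) else d)
          d)
      PySem.Dict.empty).items
      = (PySem.List.enumerate rm).map (fun p => (p.1, pvInnerD p.2)) := by
  have aux : ∀ (rm : List (List Int)) (s : Int) (d : PySem.Dict Int (PySem.Dict Int Int)),
      d.keys.Nodup → (∀ k ∈ d.keys, k < s) →
      ((PySem.List.enumerate rm s).foldl
        (fun d p =>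
          let d := d.insert p.1 PySem.Dict.empty
          (PySem.List.enumerate p.2).foldl
            (fun d q => if q.2 ≠ -1 then d.insert p.1 ((d.getD p.1 PySem.Dict.empty).insert q.1 q.2) else d)
            d)
        d).items
        = d.items ++ (PySem.List.enumerate rm s).map (fun p => (p.1, pvInnerD p.2)) := by
    intro rm
    induction rm with
    | nil => intro s d _ _; simp [PySem.List.enumerate]
    | cons row rm ih =>
      intro s d hn hlt
      rw [PySem.List.enumerate_cons]
      simp only [List.foldl_cons, List.map_cons]
      have hnc : d.contains s = false := by
        rw [PySem.Dict.contains_eq_decide_mem_keys]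
        simp only [decide_eq_false_iff_not]
        intro hmem
        exact absurd (hlt s hmem) (lt_irrefl s)
      have hstep :
          (PySem.List.enumerate row).foldl
            (fun d q => if q.2 ≠ -1 then d.insert s ((d.getD s PySem.Dict.empty).insert q.1 q.2) else d)
            (d.insert s PySem.Dict.empty)
          = d.insert s (pvInnerD row) := by
        rw [pv_inner_loop s _ _ PySem.Dict.empty (PySem.Dict.get?_insert_self _ _ _)
          (PySem.Dict.nodup_keys_insert _ _ _ hn), PySem.Dict.insert_insert_self]
        rfl
      simp only [hstep]
      rw [ih (s + 1) _ (PySem.Dict.nodup_keys_insert _ _ _ hn) ?bound]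
      · rw [PySem.Dict.items_insert_of_not_contains _ _ hnc]
        simp
      case bound =>
        intro k hk
        rw [PySem.Dict.keys_insert_of_not_contains _ _ hnc] at hk
        rcases List.mem_append.mp hk with hk | hk
        · exact lt_trans (hlt k hk) (by omega)
        · simp at hk; omega
  have := aux rm 0 PySem.Dict.empty (by simp [PySem.Dict.keys_empty]) (by simp [PySem.Dict.keys_empty])
  simpa using this

-- ---- characterisation of the inner dict ----
theorem pv_filter_fst_nodup (row : List Int) :
    (((PySem.List.enumerate row).filter (fun p => decide (p.2 ≠ -1))).map (fun a => a.1)).Nodup := by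
  have hsub : ((PySem.List.enumerate row).filter (fun p => decide (p.2 ≠ -1))).Sublist
      (PySem.List.enumerate row) := List.filter_sublist
  have hpl : ((PySem.List.enumerate row).map (fun a => a.1)).Pairwise (· < ·) := by
    rw [List.pairwise_map]
    exact PySem.List.pairwise_lt_enumerate row 0
  exact ((hpl.imp ne_of_lt).sublist (hsub.map _))

theorem pvInnerD_items (row : List Int) :
    (pvInnerD row).items = (PySem.List.enumerate row).filter (fun p => decide (p.2 ≠ -1)) := by
  unfold pvInnerD
  have hsplit : ∀ (l : List (Int × Int)) (d : PySem.Dict Int Int),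
      l.foldl (fun d q => if q.2 ≠ -1 then d.insert q.1 q.2 else d) d
        = (l.filter (fun p => decide (p.2 ≠ -1))).foldl (fun d q => d.insert q.1 q.2) d := by
    intro l
    induction l with
    | nil => intro d; rfl
    | cons q l ih =>
      intro d
      simp only [List.foldl_cons, List.filter_cons]
      by_cases hq : q.2 ≠ -1
      · rw [if_pos hq, if_pos (show decide (q.2 ≠ -1) = true by simpa using hq)]
        simp only [List.foldl_cons]
        exact ih _
      · rw [if_neg hq, if_neg (show ¬ decide (q.2 ≠ -1) = true by simpa using hq)]
        exact ih _
  rw [hsplit]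
  have := PySem.Dict.items_foldl_insert_fresh
    ((PySem.List.enumerate row).filter (fun p => decide (p.2 ≠ -1)))
    (fun (a : Int × Int) => a.1) (fun (a : Int × Int) => a.2) PySem.Dict.empty
    (fun a _ => PySem.Dict.contains_empty _) (pv_filter_fst_nodup row)
  simpa using this

theorem pvInnerD_nodup (row : List Int) : (pvInnerD row).keys.Nodup := by
  simp only [PySem.Dict.keys, pvInnerD_items]
  exact pv_filter_fst_nodup row

theorem pvK_pairwise (row : List Int) : (pvInnerD row).keys.Pairwise (· < ·) := by
  simp only [PySem.Dict.keys, pvInnerD_items]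
  have hsub : ((PySem.List.enumerate row).filter (fun p => decide (p.2 ≠ -1))).Sublist
      (PySem.List.enumerate row) := List.filter_sublist
  have hpl : ((PySem.List.enumerate row).map (fun a => a.1)).Pairwise (· < ·) := by
    rw [List.pairwise_map]
    exact PySem.List.pairwise_lt_enumerate row 0
  exact hpl.sublist (hsub.map _)

theorem pvInnerD_contains (row : List Int) (t : Int) :
    (pvInnerD row).contains t = true ↔
      (0 ≤ t ∧ t < (row.length : Int) ∧ PySem.List.pyGetD row t 0 ≠ -1) := by
  rw [PySem.Dict.contains_eq_decide_mem_keys]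
  simp only [PySem.Dict.keys, pvInnerD_items, decide_eq_true_eq]
  constructor
  · intro h
    rcases List.mem_map.mp h with ⟨p, hp, hpt⟩
    rcases List.mem_filter.mp hp with ⟨hpe, hpv⟩
    rcases (PySem.List.mem_enumerate_iff _ _ _).mp hpe with ⟨k, hk, hpk⟩
    subst hpk
    simp only [decide_eq_true_eq] at hpv
    simp only at hpt
    subst hpt
    refine ⟨by omega, by omega, ?_⟩
    rw [show ((0:Int) + (k:Int)) = ((k:Int)) by omega, PySem.List.pyGetD_natCast,
      List.getD_eq_getElem _ _ hk]
    exact hpv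
  · rintro ⟨h0, hlen, hval⟩
    apply List.mem_map.mpr
    have hk : t.toNat < row.length := by omega
    refine ⟨(t, row[t.toNat]), List.mem_filter.mpr ⟨?_, ?_⟩, rfl⟩
    · apply (PySem.List.mem_enumerate_iff _ _ _).mpr
      exact ⟨t.toNat, hk, by simp; omega⟩
    · simp only [decide_eq_true_eq]
      intro hcon
      apply hval
      rw [show t = ((t.toNat : Nat) : Int) by omega, PySem.List.pyGetD_natCast,
        List.getD_eq_getElem _ _ hk]
      exact hcon

theorem pvK_mem (row : List Int) (t : Int) :
    t ∈ (pvInnerD row).keys ↔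
      (0 ≤ t ∧ t < (row.length : Int) ∧ PySem.List.pyGetD row t 0 ≠ -1) := by
  rw [← pvInnerD_contains, PySem.Dict.contains_eq_decide_mem_keys]
  simp

theorem pv_mem_innerD_items (row : List Int) (p : Int × Int) (hp : p ∈ (pvInnerD row).items) :
    p.2 = PySem.List.pyGetD row p.1 0 := by
  rw [pvInnerD_items] at hp
  rcases List.mem_filter.mp hp with ⟨hpe, _⟩
  rcases (PySem.List.mem_enumerate_iff _ _ _).mp hpe with ⟨k, hk, hpk⟩
  subst hpk
  simp only
  rw [show ((0:Int) + (k:Int)) = ((k:Int)) by omega, PySem.List.pyGetD_natCast,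
    List.getD_eq_getElem _ _ hk]

theorem pvInnerD_getD (row : List Int) (t : Int) (h : (pvInnerD row).contains t = true) :
    (pvInnerD row).getD t 0 = PySem.List.pyGetD row t 0 := by
  rw [PySem.Dict.contains_eq_decide_mem_keys] at h
  simp only [PySem.Dict.keys, decide_eq_true_eq] at h
  rcases List.mem_map.mp h with ⟨p, hp, hpt⟩
  subst hpt
  rw [PySem.Dict.getD_of_mem_items _ hp (pvInnerD_nodup row)]
  exact pv_mem_innerD_items row p hp

-- ---- generic paired conditional-insert machinery ----
-- a step that (maybe) inserts (lab, g t) into the q-side and (lab, t) into the s-side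
def pvGIns {α : Type} (g : Int → Int) (act : α → Option (String × Int))
    (x : PySem.Dict String Int × PySem.Dict String Int) (j : α) :
    PySem.Dict String Int × PySem.Dict String Int :=
  match act j with
  | some (lab, t) => (x.1.insert lab (g t), x.2.insert lab t)
  | none => x

theorem pvGIns_snd {α : Type} (g : Int → Int) (act : α → Option (String × Int)) (l : List α)
    (x : PySem.Dict String Int × PySem.Dict String Int) :
    (l.foldl (pvGIns g act) x).2
      = l.foldl (fun d j => match act j with | some (lab, t) => d.insert lab t | none => d) x.2 := by
  induction l generalizing x with
  | nil => rfl
  | cons j l ih =>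
    simp only [List.foldl_cons]
    rcases hact : act j with _ | ⟨lab, t⟩ <;> simp only [pvGIns, hact] <;> exact ih _

theorem pv_items_insert_map (d d' : PySem.Dict String Int) (g : Int → Int)
    (h : d.items = d'.items.map (fun r => (r.1, g r.2))) (k : String) (v : Int) :
    (d.insert k (g v)).items = ((d'.insert k v).items).map (fun r => (r.1, g r.2)) := by
  have hk : d.contains k = d'.contains k := by
    rw [PySem.Dict.contains_eq_decide_mem_keys, PySem.Dict.contains_eq_decide_mem_keys]
    simp only [PySem.Dict.keys, h, List.map_map]
    rfl
  by_cases hc : d'.contains k = true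
  · rw [PySem.Dict.items_insert_of_contains _ _ (by rw [hk]; exact hc),
      PySem.Dict.items_insert_of_contains _ _ hc, h, List.map_map, List.map_map]
    apply List.map_congr_left
    intro p hp
    by_cases hpk : p.1 = k <;> simp [hpk]
  · have hc' : d'.contains k = false := by revert hc; cases d'.contains k <;> simp
    rw [PySem.Dict.items_insert_of_not_contains _ _ (by rw [hk]; exact hc'),
      PySem.Dict.items_insert_of_not_contains _ _ hc', h]
    simp

theorem pvGIns_fst {α : Type} (g : Int → Int) (act : α → Option (String × Int)) (l : List α)
    (x : PySem.Dict String Int × PySem.Dict String Int)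
    (h : x.1.items = x.2.items.map (fun r => (r.1, g r.2))) :
    (l.foldl (pvGIns g act) x).1.items
      = (l.foldl (pvGIns g act) x).2.items.map (fun r => (r.1, g r.2)) := by
  induction l generalizing x with
  | nil => exact h
  | cons j l ih =>
    simp only [List.foldl_cons]
    rcases hact : act j with _ | ⟨lab, t⟩
    · simp only [pvGIns, hact]
      exact ih _ h
    · simp only [pvGIns, hact]
      exact ih _ (pv_items_insert_map _ _ g h lab t)

-- ---- localisation of A's second loop ----
-- pure (inner-dict) mirror of pvRowStep
def pvPIns (x : PySem.Dict String Int × PySem.Dict String Int) (lab : String) (qv sv : Int) :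
    PySem.Dict String Int × PySem.Dict String Int :=
  (x.1.insert lab qv, x.2.insert lab sv)

def pvPureRow (di : PySem.Dict Int Int) (i : Int)
    (x : PySem.Dict String Int × PySem.Dict String Int) (j : Int) :
    PySem.Dict String Int × PySem.Dict String Int :=
  if i = 12 then
    if di.contains 7 then pvPIns x "R" (di.getD 7 0) 7 else x
  else if i = 20 then
    if di.contains 11 then pvPIns x "L" (di.getD 11 0) 11 else x
  else if i = 7 then
    let x := if di.contains 12 then pvPIns x "L" (di.getD 12 0) 12 else x
    let x := if di.contains 13 then pvPIns x "R" (di.getD 13 0) 13 else x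
    let x := if di.contains 0 then pvPIns x "U" (di.getD 0 0) 0 else x
    if di.contains 24 then pvPIns x "D" (di.getD 24 0) 24 else x
  else if i = 11 then
    let x := if di.contains 20 then pvPIns x "R" (di.getD 20 0) 20 else x
    let x := if di.contains 19 then pvPIns x "L" (di.getD 19 0) 19 else x
    let x := if di.contains 6 then pvPIns x "U" (di.getD 6 0) 6 else x
    if di.contains 30 then pvPIns x "D" (di.getD 30 0) 30 else x
  else if j - 1 = i then pvPIns x "R" (di.getD j 0) j
  else if j + 1 = i then pvPIns x "L" (di.getD j 0) j
  else if j + 1 < i then pvPIns x "U" (di.getD j 0) j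
  else if j - 1 > i then pvPIns x "D" (di.getD j 0) j
  else x

theorem pv_rowStep_loc (di : PySem.Dict Int Int) (i j : Int)
    (q s : PySem.Dict Int (PySem.Dict String Int)) (qi si : PySem.Dict String Int)
    (hq : q.get? i = some qi) (hs : s.get? i = some si)
    (hqn : q.keys.Nodup) (hsn : s.keys.Nodup) :
    pvRowStep di i (q, s) j
      = (q.insert i (pvPureRow di i (qi, si) j).1, s.insert i (pvPureRow di i (qi, si) j).2) := by
  have hgq : q.getD i PySem.Dict.empty = qi := PySem.Dict.getD_of_get?_eq_some q PySem.Dict.empty hq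
  have hgs : s.getD i PySem.Dict.empty = si := PySem.Dict.getD_of_get?_eq_some s PySem.Dict.empty hs
  have eqq : q.insert i qi = q := pv_insert_eq_self q i qi hq hqn
  have eqs : s.insert i si = s := pv_insert_eq_self s i si hs hsn
  by_cases h12 : i = 12
  · subst h12
    by_cases c : di.contains 7 <;>
      simp [pvRowStep, pvPureRow, pvSetQS, pvPIns, c, hgq, hgs, eqq, eqs]
  · by_cases h20 : i = 20
    · subst h20
      by_cases c : di.contains 11 <;>
        simp [pvRowStep, pvPureRow, pvSetQS, pvPIns, c, hgq, hgs, eqq, eqs]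
    · by_cases h7 : i = 7
      · subst h7
        by_cases c1 : di.contains 12 = true <;> by_cases c2 : di.contains 13 = true <;>
          by_cases c3 : di.contains 0 = true <;> by_cases c4 : di.contains 24 = true <;>
            simp [pvRowStep, pvPureRow, pvSetQS, pvPIns, c1, c2, c3, c4, hgq, hgs, eqq, eqs,
              PySem.Dict.getD_insert_self, PySem.Dict.insert_insert_self]
      · by_cases h11 : i = 11
        · subst h11
          by_cases c1 : di.contains 20 = true <;> by_cases c2 : di.contains 19 = true <;>
            by_cases c3 : di.contains 6 = true <;> by_cases c4 : di.contains 30 = true <;>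
              simp [pvRowStep, pvPureRow, pvSetQS, pvPIns, c1, c2, c3, c4, hgq, hgs, eqq, eqs,
                PySem.Dict.getD_insert_self, PySem.Dict.insert_insert_self]
        · simp only [pvRowStep, pvPureRow, if_neg h12, if_neg h20, if_neg h7, if_neg h11]
          split_ifs <;> simp [pvSetQS, pvPIns, hgq, hgs, eqq, eqs]

theorem pv_rowFold_loc (di : PySem.Dict Int Int) (i : Int) (l : List Int)
    (q s : PySem.Dict Int (PySem.Dict String Int)) (qi si : PySem.Dict String Int)
    (hq : q.get? i = some qi) (hs : s.get? i = some si)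
    (hqn : q.keys.Nodup) (hsn : s.keys.Nodup) :
    l.foldl (pvRowStep di i) (q, s)
      = (q.insert i (l.foldl (pvPureRow di i) (qi, si)).1,
         s.insert i (l.foldl (pvPureRow di i) (qi, si)).2) := by
  induction l generalizing q s qi si with
  | nil =>
    simp only [List.foldl_nil]
    rw [pv_insert_eq_self q i qi hq hqn, pv_insert_eq_self s i si hs hsn]
  | cons j l ih =>
    simp only [List.foldl_cons]
    rw [pv_rowStep_loc di i j q s qi si hq hs hqn hsn]
    rw [ih _ _ _ _ (PySem.Dict.get?_insert_self _ _ _) (PySem.Dict.get?_insert_self _ _ _)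
      (PySem.Dict.nodup_keys_insert _ _ _ hqn) (PySem.Dict.nodup_keys_insert _ _ _ hsn)]
    rw [PySem.Dict.insert_insert_self, PySem.Dict.insert_insert_self]

-- result of A's second loop for one row
def pvRowOut (D : PySem.Dict Int (PySem.Dict Int Int)) (i : Int) :
    PySem.Dict String Int × PySem.Dict String Int :=
  (D.getD i PySem.Dict.empty).keys.foldl (pvPureRow (D.getD i PySem.Dict.empty) i)
    (PySem.Dict.empty, PySem.Dict.empty)

theorem pv_loop2 (D : PySem.Dict Int (PySem.Dict Int Int)) (l : List Int)
    (q s : PySem.Dict Int (PySem.Dict String Int)) (hl : l.Nodup)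
    (hqn : q.keys.Nodup) (hsn : s.keys.Nodup)
    (hfresh : ∀ k ∈ l, ¬ k ∈ q.keys ∧ ¬ k ∈ s.keys) :
    (l.foldl
        (fun qs i =>
          (D.getD i PySem.Dict.empty).keys.foldl (pvRowStep (D.getD i PySem.Dict.empty) i)
            (qs.1.insert i PySem.Dict.empty, qs.2.insert i PySem.Dict.empty))
        (q, s)).1.items = q.items ++ l.map (fun i => (i, (pvRowOut D i).1)) ∧
    (l.foldl
        (fun qs i =>
          (D.getD i PySem.Dict.empty).keys.foldl (pvRowStep (D.getD i PySem.Dict.empty) i)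
            (qs.1.insert i PySem.Dict.empty, qs.2.insert i PySem.Dict.empty))
        (q, s)).2.items = s.items ++ l.map (fun i => (i, (pvRowOut D i).2)) := by
  induction l generalizing q s with
  | nil => simp
  | cons i l ih =>
    simp only [List.foldl_cons, List.map_cons]
    have hil : i ∉ l := (List.nodup_cons.mp hl).1
    have hiq : i ∉ q.keys := (hfresh i (List.mem_cons_self)).1
    have his : i ∉ s.keys := (hfresh i (List.mem_cons_self)).2
    have hstep :
        (D.getD i PySem.Dict.empty).keys.foldl (pvRowStep (D.getD i PySem.Dict.empty) i)
            (q.insert i PySem.Dict.empty, s.insert i PySem.Dict.empty)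
        = (q.insert i (pvRowOut D i).1, s.insert i (pvRowOut D i).2) := by
      rw [pv_rowFold_loc _ i _ _ _ PySem.Dict.empty PySem.Dict.empty
        (PySem.Dict.get?_insert_self _ _ _) (PySem.Dict.get?_insert_self _ _ _)
        (PySem.Dict.nodup_keys_insert _ _ _ hqn) (PySem.Dict.nodup_keys_insert _ _ _ hsn)]
      rw [PySem.Dict.insert_insert_self, PySem.Dict.insert_insert_self]
      rfl
    rw [hstep]
    have hqc : q.contains i = false := by
      rw [PySem.Dict.contains_eq_decide_mem_keys]; simpa using hiq
    have hsc : s.contains i = false := by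
      rw [PySem.Dict.contains_eq_decide_mem_keys]; simpa using his
    have hfresh' : ∀ k ∈ l, ¬ k ∈ (q.insert i (pvRowOut D i).1).keys ∧ ¬ k ∈ (s.insert i (pvRowOut D i).2).keys := by
      intro k hk
      have hki : k ≠ i := fun hE => hil (hE ▸ hk)
      constructor
      · rw [PySem.Dict.mem_keys_insert]
        exact fun h => h.elim hki (hfresh k (List.mem_cons_of_mem _ hk)).1
      · rw [PySem.Dict.mem_keys_insert]
        exact fun h => h.elim hki (hfresh k (List.mem_cons_of_mem _ hk)).2
    have := ih _ _ (List.nodup_cons.mp hl).2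
      (PySem.Dict.nodup_keys_insert _ _ _ hqn) (PySem.Dict.nodup_keys_insert _ _ _ hsn) hfresh'
    rw [this.1, this.2,
      PySem.Dict.items_insert_of_not_contains _ _ hqc, PySem.Dict.items_insert_of_not_contains _ _ hsc]
    simp

-- ---- special rows: constant step, fixpoint ----
def pvCIns (di : PySem.Dict Int Int) (x : PySem.Dict String Int × PySem.Dict String Int)
    (p : String × Int) : PySem.Dict String Int × PySem.Dict String Int :=
  if di.contains p.2 then (x.1.insert p.1 (di.getD p.2 0), x.2.insert p.1 p.2) else x

theorem pv_foldl_const_fix {α β : Type} (u : β → β) (l : List α) (y : β) (hy : u y = y) :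
    l.foldl (fun st _ => u st) y = y := by
  induction l with
  | nil => rfl
  | cons a l ih => simp only [List.foldl_cons, hy]; exact ih

theorem pv_cIns_fold_get?_preserved (di : PySem.Dict Int Int) (sp : List (String × Int))
    (x : PySem.Dict String Int × PySem.Dict String Int) (k : String)
    (hk : ∀ p ∈ sp, p.1 ≠ k) :
    (sp.foldl (pvCIns di) x).1.get? k = x.1.get? k ∧ (sp.foldl (pvCIns di) x).2.get? k = x.2.get? k := by
  induction sp generalizing x with
  | nil => exact ⟨rfl, rfl⟩
  | cons p sp ih =>
    simp only [List.foldl_cons]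
    have hpk : k ≠ p.1 := fun hE => hk p List.mem_cons_self hE.symm
    rcases ih (pvCIns di x p) (fun r hr => hk r (List.mem_cons_of_mem _ hr)) with ⟨h1, h2⟩
    rw [h1, h2]
    by_cases hc : di.contains p.2 = true
    · simp only [pvCIns, if_pos hc]
      exact ⟨PySem.Dict.get?_insert_of_ne _ _ hpk, PySem.Dict.get?_insert_of_ne _ _ hpk⟩
    · simp only [pvCIns, if_neg hc]
      exact ⟨trivial, trivial⟩

theorem pv_cIns_fold_get? (di : PySem.Dict Int Int) (sp : List (String × Int))
    (hn : (sp.map Prod.fst).Nodup) (x : PySem.Dict String Int × PySem.Dict String Int) :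
    ∀ p ∈ sp, di.contains p.2 = true →
      (sp.foldl (pvCIns di) x).1.get? p.1 = some (di.getD p.2 0) ∧
      (sp.foldl (pvCIns di) x).2.get? p.1 = some p.2 := by
  induction sp generalizing x with
  | nil => intro p hp; exact absurd hp (List.not_mem_nil)
  | cons r sp ih =>
    intro p hp hc
    simp only [List.foldl_cons]
    rcases List.mem_cons.mp hp with hp | hp
    · subst hp
      have hnk : ∀ t ∈ sp, t.1 ≠ p.1 := by
        intro t ht
        have := (List.nodup_cons.mp hn).1
        intro hE
        exact this (hE ▸ List.mem_map.mpr ⟨t, ht, rfl⟩)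
      rcases pv_cIns_fold_get?_preserved di sp
        (pvCIns di x p) p.1 hnk with ⟨h1, h2⟩
      simp only [pvCIns, if_pos hc] at h1 h2 ⊢
      rw [h1, h2]
      exact ⟨PySem.Dict.get?_insert_self _ _ _, PySem.Dict.get?_insert_self _ _ _⟩
    · exact ih (List.nodup_cons.mp hn).2 _ p hp hc

theorem pv_cIns_fold_nodup (di : PySem.Dict Int Int) (sp : List (String × Int))
    (x : PySem.Dict String Int × PySem.Dict String Int)
    (h1 : x.1.keys.Nodup) (h2 : x.2.keys.Nodup) :
    (sp.foldl (pvCIns di) x).1.keys.Nodup ∧ (sp.foldl (pvCIns di) x).2.keys.Nodup := by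
  induction sp generalizing x with
  | nil => exact ⟨h1, h2⟩
  | cons p sp ih =>
    simp only [List.foldl_cons]
    by_cases hc : di.contains p.2 = true
    · simp only [pvCIns, if_pos hc]
      exact ih _ (PySem.Dict.nodup_keys_insert _ _ _ h1) (PySem.Dict.nodup_keys_insert _ _ _ h2)
    · simp only [pvCIns, if_neg hc]
      exact ih _ h1 h2

theorem pv_cIns_fold_fixed (di : PySem.Dict Int Int) (sp : List (String × Int))
    (y : PySem.Dict String Int × PySem.Dict String Int)
    (h : ∀ p ∈ sp, di.contains p.2 = true →
      y.1.get? p.1 = some (di.getD p.2 0) ∧ y.2.get? p.1 = some p.2)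
    (h1 : y.1.keys.Nodup) (h2 : y.2.keys.Nodup) :
    sp.foldl (pvCIns di) y = y := by
  induction sp generalizing y with
  | nil => rfl
  | cons p sp ih =>
    simp only [List.foldl_cons]
    have hstep : pvCIns di y p = y := by
      by_cases hc : di.contains p.2 = true
      · rcases h p List.mem_cons_self hc with ⟨hy1, hy2⟩
        simp only [pvCIns, if_pos hc]
        rw [pv_insert_eq_self _ _ _ hy1 h1, pv_insert_eq_self _ _ _ hy2 h2]
      · simp only [pvCIns, if_neg hc]
    rw [hstep]
    exact ih y (fun p hp => h p (List.mem_cons_of_mem _ hp)) h1 h2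

theorem pv_nodup_keys_empty {κ ν : Type} [BEq κ] : (PySem.Dict.empty : PySem.Dict κ ν).keys.Nodup := by
  rw [PySem.Dict.keys_empty]; exact List.nodup_nil

-- A's per-row fold on a special row i with constant move list sp is the pvCIns-fold, done once
theorem pv_special_fold (di : PySem.Dict Int Int) (i : Int) (sp : List (String × Int))
    (hnsp : (sp.map Prod.fst).Nodup)
    (hstep : ∀ (x : PySem.Dict String Int × PySem.Dict String Int) (j : Int),
      pvPureRow di i x j = sp.foldl (pvCIns di) x) :
    di.keys.foldl (pvPureRow di i) (PySem.Dict.empty, PySem.Dict.empty)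
      = sp.foldl (pvCIns di) (PySem.Dict.empty, PySem.Dict.empty) := by
  rcases hK : di.keys with _ | ⟨k, rest⟩
  · simp only [List.foldl_nil]
    refine (pv_cIns_fold_fixed di sp _ ?_ pv_nodup_keys_empty pv_nodup_keys_empty).symm
    intro p hp hc
    rw [PySem.Dict.contains_eq_decide_mem_keys, hK] at hc
    simp at hc
  · have hcongr :
        (k :: rest).foldl (pvPureRow di i) (PySem.Dict.empty, PySem.Dict.empty)
          = (k :: rest).foldl
              (fun st (_ : Int) => sp.foldl (pvCIns di) st)
              (PySem.Dict.empty, PySem.Dict.empty) :=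
      PySem.List.foldl_congr_mem _ _ _ _ (fun acc x _ => hstep acc x)
    rw [hcongr, List.foldl_cons]
    have hnd := pv_cIns_fold_nodup di sp (PySem.Dict.empty, PySem.Dict.empty)
      pv_nodup_keys_empty pv_nodup_keys_empty
    exact pv_foldl_const_fix _ rest _
      (pv_cIns_fold_fixed di sp _
        (fun p hp hc => pv_cIns_fold_get? di sp hnsp _ p hp hc) hnd.1 hnd.2)

-- items of a conditional fresh-distinct-key insert loop
theorem pv_cond_insert_items (l : List (String × Int)) (c : String × Int → Bool)
    (hn : (l.map Prod.fst).Nodup) :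
    (l.foldl (fun d p => if c p then d.insert p.1 p.2 else d)
        (PySem.Dict.empty : PySem.Dict String Int)).items = l.filter c := by
  have hsplit : ∀ (l : List (String × Int)) (d : PySem.Dict String Int),
      l.foldl (fun d p => if c p then d.insert p.1 p.2 else d) d
        = (l.filter c).foldl (fun d p => d.insert p.1 p.2) d := by
    intro l
    induction l with
    | nil => intro d; rfl
    | cons p l ih =>
      intro d
      simp only [List.foldl_cons, List.filter_cons]
      by_cases hc : c p = true
      · rw [if_pos hc, if_pos hc]
        simp only [List.foldl_cons]
        exact ih _
      · rw [if_neg hc, if_neg hc]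
        exact ih _
  rw [hsplit]
  have hfn : ((l.filter c).map Prod.fst).Nodup :=
    hn.sublist ((List.filter_sublist).map _)
  have := PySem.Dict.items_foldl_insert_fresh (l.filter c)
    (fun (p : String × Int) => p.1) (fun (p : String × Int) => p.2) PySem.Dict.empty
    (fun a _ => PySem.Dict.contains_empty _) hfn
  simpa using this

-- pvCIns as a pvGIns step
theorem pv_cIns_eq_gIns (row : List Int) (x : PySem.Dict String Int × PySem.Dict String Int)
    (p : String × Int) :
    pvCIns (pvInnerD row) x p
      = pvGIns (fun t => PySem.List.pyGetD row t 0)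
          (fun (p : String × Int) => if (pvInnerD row).contains p.2 = true then some p else none) x p := by
  by_cases hc : (pvInnerD row).contains p.2 = true
  · simp only [pvCIns, pvGIns, if_pos hc, pvInnerD_getD row p.2 hc]
  · simp only [pvCIns, pvGIns, if_neg hc]

-- ---- normal rows: direction function and canonical items list ----
def pvDirection (i j : Int) : Option String :=
  if j = i + 1 then some "R"
  else if j = i - 1 then some "L"
  else if j < i - 1 then some "U"
  else if j > i + 1 then some "D"
  else none

def pvCanon (i : Int) (P : List Int) : List (String × Int) :=
  (match (P.filter (fun j => decide (j < i - 1))).getLast? with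
    | some u => [("U", u)] | none => []) ++
  (if (i - 1) ∈ P then [("L", i - 1)] else []) ++
  (if (i + 1) ∈ P then [("R", i + 1)] else []) ++
  (match (P.filter (fun j => decide (i + 1 < j))).getLast? with
    | some d => [("D", d)] | none => [])

theorem pv_canon_mem_fst (i : Int) (P : List Int) (lab : String) :
    lab ∈ (pvCanon i P).map Prod.fst ↔
      (lab = "U" ∧ ((P.filter (fun j => decide (j < i - 1))).getLast?).isSome = true) ∨
      (lab = "L" ∧ (i - 1) ∈ P) ∨
      (lab = "R" ∧ (i + 1) ∈ P) ∨
      (lab = "D" ∧ ((P.filter (fun j => decide (i + 1 < j))).getLast?).isSome = true) := by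
  unfold pvCanon
  rcases h1 : (P.filter (fun j => decide (j < i - 1))).getLast? with _ | u <;>
    rcases h2 : (P.filter (fun j => decide (i + 1 < j))).getLast? with _ | dd <;>
      by_cases hL : (i - 1) ∈ P <;> by_cases hR : (i + 1) ∈ P <;>
        simp [hL, hR]

theorem pv_canon_contains (i : Int) (P : List Int) (d : PySem.Dict String Int)
    (hd : d.items = pvCanon i P) (lab : String) :
    d.contains lab = true ↔
      (lab = "U" ∧ ((P.filter (fun j => decide (j < i - 1))).getLast?).isSome = true) ∨
      (lab = "L" ∧ (i - 1) ∈ P) ∨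
      (lab = "R" ∧ (i + 1) ∈ P) ∨
      (lab = "D" ∧ ((P.filter (fun j => decide (i + 1 < j))).getLast?).isSome = true) := by
  rw [PySem.Dict.contains_eq_decide_mem_keys]
  simp only [PySem.Dict.keys, hd, decide_eq_true_eq]
  exact pv_canon_mem_fst i P lab

theorem pv_canon_step (i j : Int) (P : List Int) (hP : ∀ p ∈ P, p < j)
    (d : PySem.Dict String Int) (hd : d.items = pvCanon i P) :
    (match pvDirection i j with
      | some lab => d.insert lab j
      | none => d).items = pvCanon i (P ++ [j]) := by
  by_cases hR : j = i + 1
  · -- R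
    subst hR
    have hdir : pvDirection i (i + 1) = some "R" := by simp [pvDirection]
    rw [hdir]
    have hnR : (i + 1) ∉ P := fun h => absurd (hP _ h) (lt_irrefl _)
    have hcon : ¬ d.contains "R" = true := by
      rw [pv_canon_contains i P d hd]
      simp [hnR]
    have hfU : (P ++ [i + 1]).filter (fun j => decide (j < i - 1))
        = P.filter (fun j => decide (j < i - 1)) := by
      simp [List.filter_append, show ¬ (i + 1 < i - 1) by omega]
    have hfDP : P.filter (fun j => decide (i + 1 < j)) = [] :=
      List.filter_eq_nil_iff.mpr (fun a ha => by simpa using (by have := hP a ha; omega : ¬ (i + 1 < a)))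
    have hfD : (P ++ [i + 1]).filter (fun j => decide (i + 1 < j)) = [] := by
      simp [List.filter_append, hfDP]
    rw [PySem.Dict.items_insert_of_not_contains _ _ (by simpa using hcon), hd]
    unfold pvCanon
    rw [hfU, hfD, hfDP]
    have hmemL : ((i - 1) ∈ P ++ [i + 1]) ↔ (i - 1) ∈ P := by simp; omega
    simp [hmemL, hnR]
  · by_cases hL : j = i - 1
    · subst hL
      have hdir : pvDirection i (i - 1) = some "L" := by
        simp [pvDirection, show ¬ (i - 1 = i + 1) by omega]
      rw [hdir]
      have hnL : (i - 1) ∉ P := fun h => absurd (hP _ h) (lt_irrefl _)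
      have hnRm : (i + 1) ∉ P := fun h => absurd (hP _ h) (by omega)
      have hcon : ¬ d.contains "L" = true := by
        rw [pv_canon_contains i P d hd]
        simp [hnL]
      have hfU : (P ++ [i - 1]).filter (fun j => decide (j < i - 1))
          = P.filter (fun j => decide (j < i - 1)) := by
        simp [List.filter_append, ]
      have hfDP : P.filter (fun j => decide (i + 1 < j)) = [] :=
        List.filter_eq_nil_iff.mpr (fun a ha => by simpa using (by have := hP a ha; omega : ¬ (i + 1 < a)))
      have hfD : (P ++ [i - 1]).filter (fun j => decide (i + 1 < j)) = [] := by
        simp [List.filter_append, hfDP, show ¬ (i + 1 < i - 1) by omega]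
      rw [PySem.Dict.items_insert_of_not_contains _ _ (by simpa using hcon), hd]
      unfold pvCanon
      rw [hfU, hfD, hfDP]
      have hmemR : ((i + 1) ∈ P ++ [i - 1]) ↔ False := by simp [hnRm]; omega
      simp [hnL, hnRm, hmemR]
    · by_cases hU : j < i - 1
      · have hdir : pvDirection i j = some "U" := by
          simp [pvDirection, hR, hL, hU]
        rw [hdir]
        have hnL : (i - 1) ∉ P := fun h => absurd (hP _ h) (by omega)
        have hnRm : (i + 1) ∉ P := fun h => absurd (hP _ h) (by omega)
        have hfDP : P.filter (fun j => decide (i + 1 < j)) = [] :=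
          List.filter_eq_nil_iff.mpr (fun a ha => by simpa using (by have := hP a ha; omega : ¬ (i + 1 < a)))
        have hfU : (P ++ [j]).filter (fun jj => decide (jj < i - 1))
            = P.filter (fun jj => decide (jj < i - 1)) ++ [j] := by
          simp [List.filter_append, hU]
        have hfD : (P ++ [j]).filter (fun jj => decide (i + 1 < jj)) = [] := by
          simp [List.filter_append, hfDP, show ¬ (i + 1 < j) by omega]
        have hRHS : pvCanon i (P ++ [j]) = [("U", j)] := by
          unfold pvCanon
          rw [hfU, hfD, List.getLast?_concat]
          simp [hnL, hnRm, show ¬ (i - 1 = j) by omega, show ¬ (i + 1 = j) by omega]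
        rw [hRHS]
        rcases h1 : (P.filter (fun jj => decide (jj < i - 1))).getLast? with _ | u
        · have hdi : d.items = [] := by
            rw [hd]; unfold pvCanon
            rw [h1, hfDP]
            simp [hnL, hnRm]
          have hcon : d.contains "U" = false := by
            rw [PySem.Dict.contains_eq_decide_mem_keys]
            simp [PySem.Dict.keys, hdi]
          rw [PySem.Dict.items_insert_of_not_contains _ _ hcon, hdi]
          simp
        · have hdi : d.items = [("U", u)] := by
            rw [hd]; unfold pvCanon
            rw [h1, hfDP]
            simp [hnL, hnRm]
          have hcon : d.contains "U" = true := by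
            rw [PySem.Dict.contains_eq_decide_mem_keys]
            simp [PySem.Dict.keys, hdi]
          rw [PySem.Dict.items_insert_of_contains _ _ hcon, hdi]
          simp
      · by_cases hD : i + 1 < j
        · have hdir : pvDirection i j = some "D" := by
            simp [pvDirection, hR, hL, hU, hD]
          rw [hdir]
          have hfU : (P ++ [j]).filter (fun jj => decide (jj < i - 1))
              = P.filter (fun jj => decide (jj < i - 1)) := by
            simp [List.filter_append, show ¬ (j < i - 1) by omega]
          have hfD : (P ++ [j]).filter (fun jj => decide (i + 1 < jj))
              = P.filter (fun jj => decide (i + 1 < jj)) ++ [j] := by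
            simp [List.filter_append, hD]
          have hmemL : ((i - 1) ∈ P ++ [j]) ↔ (i - 1) ∈ P := by simp; omega
          have hmemR : ((i + 1) ∈ P ++ [j]) ↔ (i + 1) ∈ P := by simp; omega
          have hRHS : pvCanon i (P ++ [j])
              = (match (P.filter (fun jj => decide (jj < i - 1))).getLast? with
                  | some u => [("U", u)] | none => []) ++
                (if (i - 1) ∈ P then [("L", i - 1)] else []) ++
                (if (i + 1) ∈ P then [("R", i + 1)] else []) ++ [("D", j)] := by
            unfold pvCanon
            rw [hfU, hfD, List.getLast?_concat]
            simp [hmemL, hmemR]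
          rw [hRHS]
          rcases h2 : (P.filter (fun jj => decide (i + 1 < jj))).getLast? with _ | d0
          · have hcon : d.contains "D" = false := by
              have := pv_canon_contains i P d hd "D"
              simp [h2] at this
              exact this
            rw [PySem.Dict.items_insert_of_not_contains _ _ hcon, hd]
            unfold pvCanon
            rw [h2]
            simp
          · have hcon : d.contains "D" = true := by
              rw [pv_canon_contains i P d hd]
              simp [h2]
            rw [PySem.Dict.items_insert_of_contains _ _ hcon, hd]
            unfold pvCanon
            rw [h2]
            rcases h1 : (P.filter (fun jj => decide (jj < i - 1))).getLast? with _ | u <;>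
              by_cases hLm : (i - 1) ∈ P <;> by_cases hRm : (i + 1) ∈ P <;>
                simp [hLm, hRm]
        · have hdir : pvDirection i j = none := by
            simp [pvDirection, hR, hL, hU, show ¬ (j > i + 1) from hD]
          rw [hdir, hd]
          unfold pvCanon
          have hfU : (P ++ [j]).filter (fun jj => decide (jj < i - 1))
              = P.filter (fun jj => decide (jj < i - 1)) := by
            simp [List.filter_append, hU]
          have hfD : (P ++ [j]).filter (fun jj => decide (i + 1 < jj))
              = P.filter (fun jj => decide (i + 1 < jj)) := by
            simp [List.filter_append, hD]
          have hmemL : ((i - 1) ∈ P ++ [j]) ↔ (i - 1) ∈ P := by simp; omega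
          have hmemR : ((i + 1) ∈ P ++ [j]) ↔ (i + 1) ∈ P := by simp; omega
          rw [hfU, hfD]
          simp [hmemL, hmemR]

theorem pv_canon_fold (i : Int) (l P : List Int) (d : PySem.Dict String Int)
    (h : (P ++ l).Pairwise (· < ·)) (hd : d.items = pvCanon i P) :
    (l.foldl (fun d j => match pvDirection i j with
        | some lab => d.insert lab j | none => d) d).items = pvCanon i (P ++ l) := by
  induction l generalizing P d with
  | nil => simpa using hd
  | cons j l ih =>
    have hPj : ∀ p ∈ P, p < j :=
      fun p hp => (List.pairwise_append.mp h).2.2 p hp j List.mem_cons_self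
    have hstep := pv_canon_step i j P hPj d hd
    have h' : ((P ++ [j]) ++ l).Pairwise (· < ·) := by simpa [List.append_assoc] using h
    have := ih (P ++ [j]) _ h' hstep
    simpa [List.append_assoc] using this

-- normal-row branch chain of A as the direction function
theorem pv_pureRow_normal (row : List Int) (i j : Int)
    (h12 : ¬ i = 12) (h20 : ¬ i = 20) (h7 : ¬ i = 7) (h11 : ¬ i = 11)
    (hj : j ∈ (pvInnerD row).keys) (x : PySem.Dict String Int × PySem.Dict String Int) :
    pvPureRow (pvInnerD row) i x j
      = pvGIns (fun t => PySem.List.pyGetD row t 0)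
          (fun j => (pvDirection i j).map (fun lab => (lab, j))) x j := by
  have hgd : (pvInnerD row).getD j 0 = PySem.List.pyGetD row j 0 :=
    pvInnerD_getD row j (by rw [PySem.Dict.contains_eq_decide_mem_keys]; simpa using hj)
  simp only [pvPureRow, pvGIns, pvDirection, if_neg h12, if_neg h20, if_neg h7, if_neg h11]
  split_ifs <;> first | (exfalso; omega) | (simp [pvPIns, hgd])

-- two strictly increasing integer lists with the same members are equal
theorem pv_sorted_eq (l m : List Int) (h1 : l.Pairwise (· < ·)) (h2 : m.Pairwise (· < ·))
    (h : ∀ x, x ∈ l ↔ x ∈ m) : l = m := by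
  have hperm : m.Perm l :=
    (List.perm_ext_iff_of_nodup (h2.imp ne_of_lt) (h1.imp ne_of_lt)).mpr (fun x => (h x).symm)
  have a := PySem.List.sorted_eq_of_perm_of_pairwise_lt l l (fun x : Int => x)
    (List.Perm.refl l) h1
  have b := PySem.List.sorted_eq_of_perm_of_pairwise_lt l m (fun x : Int => x) hperm h2
  rw [← a, ← b]

-- _last_valid scans its interval backwards: it is the last valid column of the row in it
theorem pv_lastValid_eq (row : List Int) (lo hi : Int) (h0 : 0 ≤ lo)
    (hn : hi ≤ (row.length : Int)) (q : Int → Bool)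
    (hq : ∀ a ∈ (pvInnerD row).keys, q a = decide (lo ≤ a ∧ a < hi)) :
    pvLastValid row lo hi = ((pvInnerD row).keys.filter q).getLast? := by
  unfold pvLastValid
  rw [← List.getLast?_filter]
  congr 1
  rw [List.filter_congr hq]
  apply pv_sorted_eq
  · exact (PySem.List.pairwise_lt_pyRange_one lo hi).filter _
  · exact (pvK_pairwise row).filter _
  · intro x
    simp only [List.mem_filter, PySem.List.mem_pyRange_one, decide_eq_true_eq, pvK_mem]
    constructor
    · rintro ⟨⟨hl, hh⟩, hv⟩
      exact ⟨⟨by omega, by omega, hv⟩, by omega, by omega⟩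
    · rintro ⟨⟨_, _, hv⟩, hl, hh⟩
      exact ⟨⟨hl, hh⟩, hv⟩

theorem pv_targets_normal (i : Int) (row : List Int) (hns : pvSpecialTb.contains i = false) :
    pvTargets i row = pvCanon i (pvInnerD row).keys := by
  unfold pvTargets
  rw [if_neg (by simp [hns])]
  have hU : pvLastValid row 0 (min (row.length : Int) (i - 1))
      = ((pvInnerD row).keys.filter (fun j => decide (j < i - 1))).getLast? := by
    apply pv_lastValid_eq row 0 _ le_rfl (min_le_left _ _)
    intro a ha
    have := (pvK_mem row a).mp ha
    simp only [decide_eq_decide]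
    omega
  have hD : pvLastValid row (max 0 (i + 2)) (row.length : Int)
      = ((pvInnerD row).keys.filter (fun j => decide (i + 1 < j))).getLast? := by
    apply pv_lastValid_eq row _ _ (le_max_left _ _) le_rfl
    intro a ha
    have := (pvK_mem row a).mp ha
    simp only [decide_eq_decide]
    omega
  have hL : (if 0 ≤ i - 1 ∧ i - 1 < (row.length : Int) ∧ PySem.List.pyGetD row (i - 1) 0 ≠ -1
        then [(("L" : String), i - 1)] else [])
      = (if (i - 1) ∈ (pvInnerD row).keys then [(("L" : String), i - 1)] else []) := by
    by_cases hc : (i - 1) ∈ (pvInnerD row).keys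
    · rw [if_pos hc, if_pos ((pvK_mem row (i - 1)).mp hc)]
    · rw [if_neg hc, if_neg (fun hP => hc ((pvK_mem row (i - 1)).mpr hP))]
  have hR : (if 0 ≤ i + 1 ∧ i + 1 < (row.length : Int) ∧ PySem.List.pyGetD row (i + 1) 0 ≠ -1
        then [(("R" : String), i + 1)] else [])
      = (if (i + 1) ∈ (pvInnerD row).keys then [(("R" : String), i + 1)] else []) := by
    by_cases hc : (i + 1) ∈ (pvInnerD row).keys
    · rw [if_pos hc, if_pos ((pvK_mem row (i + 1)).mp hc)]
    · rw [if_neg hc, if_neg (fun hP => hc ((pvK_mem row (i + 1)).mpr hP))]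
  unfold pvCanon
  rw [hU, hD, hL, hR]

-- one special row: both components of A's fold, as a filter of the constant move list
theorem pv_special_items (row : List Int) (i : Int) (sp : List (String × Int))
    (hnsp : (sp.map Prod.fst).Nodup)
    (hstep : ∀ (x : PySem.Dict String Int × PySem.Dict String Int) (j : Int),
      pvPureRow (pvInnerD row) i x j = sp.foldl (pvCIns (pvInnerD row)) x) :
    ((pvInnerD row).keys.foldl (pvPureRow (pvInnerD row) i)
        (PySem.Dict.empty, PySem.Dict.empty)).2.items
      = sp.filter (fun p => (pvInnerD row).contains p.2) ∧
    ((pvInnerD row).keys.foldl (pvPureRow (pvInnerD row) i)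
        (PySem.Dict.empty, PySem.Dict.empty)).1.items
      = (sp.filter (fun p => (pvInnerD row).contains p.2)).map
          (fun r => (r.1, PySem.List.pyGetD row r.2 0)) := by
  rw [pv_special_fold (pvInnerD row) i sp hnsp hstep]
  have hg : sp.foldl (pvCIns (pvInnerD row)) (PySem.Dict.empty, PySem.Dict.empty)
      = sp.foldl
          (pvGIns (fun t => PySem.List.pyGetD row t 0)
            (fun (p : String × Int) => if (pvInnerD row).contains p.2 = true then some p else none))
          (PySem.Dict.empty, PySem.Dict.empty) :=
    PySem.List.foldl_congr_mem _ _ _ _ (fun acc x _ => pv_cIns_eq_gIns row acc x)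
  have hsnd : (sp.foldl (pvCIns (pvInnerD row)) (PySem.Dict.empty, PySem.Dict.empty)).2.items
      = sp.filter (fun p => (pvInnerD row).contains p.2) := by
    rw [hg, pvGIns_snd]
    have hconv : sp.foldl
        (fun d (j : String × Int) =>
          match (if (pvInnerD row).contains j.2 = true then some j else none) with
          | some (lab, t) => d.insert lab t
          | none => d) PySem.Dict.empty
        = sp.foldl
            (fun d p => if (pvInnerD row).contains p.2 then d.insert p.1 p.2 else d)
            PySem.Dict.empty := by
      apply PySem.List.foldl_congr_mem
      intro acc p _
      by_cases hc : (pvInnerD row).contains p.2 = true <;> simp [hc]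
    rw [hconv, pv_cond_insert_items sp _ hnsp]
  refine ⟨hsnd, ?_⟩
  rw [← hsnd, hg]
  rw [hg] at hsnd
  exact pvGIns_fst _ _ sp _ rfl

-- ---- per-row result of A equals B's target list ----
theorem pv_row_items (i : Int) (row : List Int) :
    ((pvInnerD row).keys.foldl (pvPureRow (pvInnerD row) i)
        (PySem.Dict.empty, PySem.Dict.empty)).2.items = pvTargets i row ∧
    ((pvInnerD row).keys.foldl (pvPureRow (pvInnerD row) i)
        (PySem.Dict.empty, PySem.Dict.empty)).1.items
      = (pvTargets i row).map (fun r => (r.1, PySem.List.pyGetD row r.2 0)) := by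
  by_cases hsp : pvSpecialTb.contains i = true
  · -- special rows: the fold is a filter of the constant move list
    have hi : i = 12 ∨ i = 20 ∨ i = 7 ∨ i = 11 := by
      rw [PySem.Dict.contains_eq_decide_mem_keys] at hsp
      have hk : pvSpecialTb.keys = [12, 20, 7, 11] := by decide
      rw [hk] at hsp
      simpa using hsp
    have key : ∀ sp : List (String × Int),
        pvSpecialTb.getD i [] = sp →
        (sp.map Prod.fst).Nodup →
        (∀ (x : PySem.Dict String Int × PySem.Dict String Int) (j : Int),
          pvPureRow (pvInnerD row) i x j = sp.foldl (pvCIns (pvInnerD row)) x) →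
        ((pvInnerD row).keys.foldl (pvPureRow (pvInnerD row) i)
            (PySem.Dict.empty, PySem.Dict.empty)).2.items = pvTargets i row ∧
        ((pvInnerD row).keys.foldl (pvPureRow (pvInnerD row) i)
            (PySem.Dict.empty, PySem.Dict.empty)).1.items
          = (pvTargets i row).map (fun r => (r.1, PySem.List.pyGetD row r.2 0)) := by
      intro sp hspv hnsp hstep
      have hT : pvTargets i row = sp.filter (fun p => (pvInnerD row).contains p.2) := by
        unfold pvTargets
        rw [if_pos hsp, hspv]
        apply List.filter_congr
        intro p _
        have hiff := pvInnerD_contains row p.2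
        cases hc : (pvInnerD row).contains p.2
        · rw [hc] at hiff
          simp only [Bool.false_eq_true, false_iff] at hiff
          simp [hiff]
        · rw [hc] at hiff
          simp only [true_iff] at hiff
          simp [hiff]
      rw [hT]
      exact pv_special_items row i sp hnsp hstep
    rcases hi with h | h | h | h <;> subst h
    · exact key [("R", 7)] (by decide) (by decide)
        (fun x j => by simp [pvPureRow, pvCIns, pvPIns])
    · exact key [("L", 11)] (by decide) (by decide)
        (fun x j => by simp [pvPureRow, pvCIns, pvPIns])
    · exact key [("L", 12), ("R", 13), ("U", 0), ("D", 24)] (by decide) (by decide)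
        (fun x j => by simp [pvPureRow, pvCIns, pvPIns])
    · exact key [("R", 20), ("L", 19), ("U", 6), ("D", 30)] (by decide) (by decide)
        (fun x j => by simp [pvPureRow, pvCIns, pvPIns])
  · -- normal rows: the fold realises the canonical U/L/R/D list
    have hns : pvSpecialTb.contains i = false := by
      cases hc : pvSpecialTb.contains i
      · rfl
      · exact absurd hc hsp
    have h12 : ¬ i = 12 := fun h => hsp (h ▸ (by decide))
    have h20 : ¬ i = 20 := fun h => hsp (h ▸ (by decide))
    have h7 : ¬ i = 7 := fun h => hsp (h ▸ (by decide))
    have h11 : ¬ i = 11 := fun h => hsp (h ▸ (by decide))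
    have hA :
        (pvInnerD row).keys.foldl (pvPureRow (pvInnerD row) i) (PySem.Dict.empty, PySem.Dict.empty)
          = (pvInnerD row).keys.foldl
              (pvGIns (fun t => PySem.List.pyGetD row t 0)
                (fun j => (pvDirection i j).map (fun lab => (lab, j))))
              (PySem.Dict.empty, PySem.Dict.empty) :=
      PySem.List.foldl_congr_mem _ _ _ _
        (fun acc j hj => pv_pureRow_normal row i j h12 h20 h7 h11 hj acc)
    have hsnd :
        ((pvInnerD row).keys.foldl (pvPureRow (pvInnerD row) i)
            (PySem.Dict.empty, PySem.Dict.empty)).2.items = pvTargets i row := by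
      rw [hA, pvGIns_snd]
      have hconv : (pvInnerD row).keys.foldl
          (fun d j =>
            match (pvDirection i j).map (fun lab => (lab, j)) with
            | some (lab, t) => d.insert lab t
            | none => d) PySem.Dict.empty
          = (pvInnerD row).keys.foldl
              (fun d j => match pvDirection i j with
                | some lab => d.insert lab j | none => d) PySem.Dict.empty := by
        apply PySem.List.foldl_congr_mem
        intro acc j _
        cases h : pvDirection i j <;> simp
      rw [hconv]
      have hi0 : (PySem.Dict.empty : PySem.Dict String Int).items = [] := rfl
      have hfold := pv_canon_fold i (pvInnerD row).keys [] PySem.Dict.empty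
        (by simpa using pvK_pairwise row) (by rw [hi0]; simp [pvCanon])
      simp only [List.nil_append] at hfold
      rw [hfold, pv_targets_normal i row hns]
    refine ⟨hsnd, ?_⟩
    rw [← hsnd, hA]
    rw [hA] at hsnd
    exact pvGIns_fst _ _ _ _ rfl

-- ---- B's dict building ----
theorem pv_ofList_items {κ ν : Type} [BEq κ] [LawfulBEq κ] (l : List (κ × ν))
    (hn : (l.map Prod.fst).Nodup) : (PySem.Dict.ofList l).items = l := by
  have h : PySem.Dict.ofList l = l.foldl (fun d p => d.insert p.1 p.2) PySem.Dict.empty := rfl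
  rw [h]
  have := PySem.Dict.items_foldl_insert_fresh l (fun p : κ × ν => p.1) (fun p : κ × ν => p.2)
    PySem.Dict.empty (fun a _ => PySem.Dict.contains_empty _) hn
  simpa using this

theorem pv_targets_fst_nodup (i : Int) (row : List Int) :
    ((pvTargets i row).map Prod.fst).Nodup := by
  unfold pvTargets
  by_cases hc : pvSpecialTb.contains i = true
  · rw [if_pos hc]
    have hi : i = 12 ∨ i = 20 ∨ i = 7 ∨ i = 11 := by
      rw [PySem.Dict.contains_eq_decide_mem_keys] at hc
      have hk : pvSpecialTb.keys = [12, 20, 7, 11] := by decide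
      rw [hk] at hc
      simpa using hc
    have hbase : ((pvSpecialTb.getD i []).map Prod.fst).Nodup := by
      rcases hi with h | h | h | h <;> subst h <;> decide
    exact hbase.sublist ((List.filter_sublist).map _)
  · rw [if_neg hc]
    rcases h1 : pvLastValid row 0 (min (row.length : Int) (i - 1)) with _ | u <;>
      rcases h2 : pvLastValid row (max 0 (i + 2)) (row.length : Int) with _ | d <;>
        split_ifs <;> simp

theorem pv_pair_fold_split {α β γ : Type} (l : List α) (u : β → α → β) (v : γ → α → γ)
    (a : β) (b : γ) :
    l.foldl (fun x p => (u x.1 p, v x.2 p)) (a, b) = (l.foldl u a, l.foldl v b) := by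
  induction l generalizing a b with
  | nil => rfl
  | cons p l ih => simpa [List.foldl_cons] using ih (u a p) (v b p)

theorem pv_enum_fst_nodup (rm : List (List Int)) :
    ((PySem.List.enumerate rm).map (fun p => p.1)).Nodup := by
  have hpl : ((PySem.List.enumerate rm).map (fun p => p.1)).Pairwise (· < ·) := by
    rw [List.pairwise_map]
    exact PySem.List.pairwise_lt_enumerate rm 0
  exact hpl.imp ne_of_lt

-- ===== VERDICT (by name: the statement is the Claim_ definition above) =====
theorem create_q_table_and_state_table_spec : Claim_equal_create_q_table_and_state_table := by
  unfold Claim_equal_create_q_table_and_state_table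
  intro rm _
  unfold Spec_create_q_table_and_state_table
  unfold create_q_table_and_state_table create_q_table_and_state_table_alt
  simp only []
  -- characterise A's first loop
  have hDitems := pv_dict_items rm
  set D := (PySem.List.enumerate rm).foldl
      (fun d p =>
        let d := d.insert p.1 PySem.Dict.empty
        (PySem.List.enumerate p.2).foldl
          (fun d q => if q.2 ≠ -1 then d.insert p.1 ((d.getD p.1 PySem.Dict.empty).insert q.1 q.2) else d)
          d)
      PySem.Dict.empty with hD
  have hDkeys : D.keys = (PySem.List.enumerate rm).map (fun p => p.1) := by
    simp only [PySem.Dict.keys, hDitems, List.map_map]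
    rfl
  have hDnodup : D.keys.Nodup := by rw [hDkeys]; exact pv_enum_fst_nodup rm
  have hDgetD : ∀ p ∈ PySem.List.enumerate rm, D.getD p.1 PySem.Dict.empty = pvInnerD p.2 := by
    intro p hp
    exact PySem.Dict.getD_of_mem_items _
      (by rw [hDitems]; exact List.mem_map.mpr ⟨p, hp, rfl⟩) hDnodup _
  -- characterise A's second loop
  have hloop := pv_loop2 D D.keys PySem.Dict.empty PySem.Dict.empty hDnodup
    pv_nodup_keys_empty pv_nodup_keys_empty
    (fun k _ => ⟨by rw [PySem.Dict.keys_empty]; exact List.not_mem_nil,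
                 by rw [PySem.Dict.keys_empty]; exact List.not_mem_nil⟩)
  -- B's single loop splits into two fresh-key insert loops
  have hsplit := pv_pair_fold_split (PySem.List.enumerate rm)
    (fun (q : PySem.Dict Int (PySem.Dict String Int)) (p : Int × List Int) =>
      q.insert p.1 (PySem.Dict.ofList ((pvTargets p.1 p.2).map
        (fun r => (r.1, PySem.List.pyGetD p.2 r.2 0)))))
    (fun (t : PySem.Dict Int (PySem.Dict String Int)) (p : Int × List Int) =>
      t.insert p.1 (PySem.Dict.ofList (pvTargets p.1 p.2)))
    PySem.Dict.empty PySem.Dict.empty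
  rw [hsplit]
  have hqtB := PySem.Dict.items_foldl_insert_fresh (PySem.List.enumerate rm)
    (fun (p : Int × List Int) => p.1)
    (fun p => PySem.Dict.ofList ((pvTargets p.1 p.2).map
      (fun r => (r.1, PySem.List.pyGetD p.2 r.2 0))))
    PySem.Dict.empty (fun a _ => PySem.Dict.contains_empty _) (pv_enum_fst_nodup rm)
  have hstB := PySem.Dict.items_foldl_insert_fresh (PySem.List.enumerate rm)
    (fun (p : Int × List Int) => p.1)
    (fun p => PySem.Dict.ofList (pvTargets p.1 p.2))
    PySem.Dict.empty (fun a _ => PySem.Dict.contains_empty _) (pv_enum_fst_nodup rm)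
  -- per-row rewriting
  have hRowOut : ∀ p ∈ PySem.List.enumerate rm,
      pvRowOut D p.1 = (pvInnerD p.2).keys.foldl (pvPureRow (pvInnerD p.2) p.1)
        (PySem.Dict.empty, PySem.Dict.empty) := by
    intro p hp
    unfold pvRowOut
    rw [hDgetD p hp]
  simp only [Prod.mk.injEq]
  constructor
  · -- q_table component
    rw [hloop.1, hqtB]
    rw [show (PySem.Dict.empty : PySem.Dict Int (PySem.Dict String Int)).items = [] from rfl]
    rw [List.nil_append, List.nil_append, hDkeys]
    simp only [List.map_map]
    apply List.map_congr_left
    intro p hp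
    simp only [Function.comp_apply]
    have hnf : (((pvTargets p.1 p.2).map (fun r => (r.1, PySem.List.pyGetD p.2 r.2 0))).map
        Prod.fst).Nodup := by
      rw [List.map_map]
      exact pv_targets_fst_nodup p.1 p.2
    rw [hRowOut p hp, (pv_row_items p.1 p.2).2, pv_ofList_items _ hnf]
  · -- state_table component
    rw [hloop.2, hstB]
    rw [show (PySem.Dict.empty : PySem.Dict Int (PySem.Dict String Int)).items = [] from rfl]
    rw [List.nil_append, List.nil_append, hDkeys]
    simp only [List.map_map]
    apply List.map_congr_left
    intro p hp
    simp only [Function.comp_apply]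
    rw [hRowOut p hp, (pv_row_items p.1 p.2).1,
      pv_ofList_items _ (pv_targets_fst_nodup p.1 p.2)]
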